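-- pv_equiv track=rewrite | github.com/SHIVAAKARTHIK/Basic-Python-Programs | programs/addConsecutive.py | sumTheSequence
-- ===== SOURCE A (Python) =====
-- def sumTheSequence(i,j,k):
--     temp1 = 0
--     temp2 = 0
--     total = 0
--     if i<= j and k<=j:
--         temp1 = j - i
--         temp2 = j - k
--         for i_digit in range (temp1):
--             total = total+(i_digit+i)
--
--         for k_digit in range (temp2):
--             total = total+(k+k_digit)
--
--         return(total+j)
--     else:
--         return(0)
-- ===== SOURCE B (Python) =====
-- def sumTheSequence(i, j, k):
--     if i <= j and k <= j:
--         # arithmetic-series closed forms: sum(i..j-1) + sum(k..j-1) + j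
--         return (j - i) * (i + j - 1) // 2 + (j - k) * (k + j - 1) // 2 + j
--     return 0
-- ===== Notes on version B (the rewrite author's own statement) =====
-- stated objective: faster
-- what changed: replaced the two O(j-i)+O(j-k) accumulation loops by the closed-form arithmetic-series formula; intended as faster (O(1) vs O(j)); a timing run measured up to 34x at the largest size but inconsistently, since inputs taking the else branch are O(1) in both
import Mathlib
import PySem

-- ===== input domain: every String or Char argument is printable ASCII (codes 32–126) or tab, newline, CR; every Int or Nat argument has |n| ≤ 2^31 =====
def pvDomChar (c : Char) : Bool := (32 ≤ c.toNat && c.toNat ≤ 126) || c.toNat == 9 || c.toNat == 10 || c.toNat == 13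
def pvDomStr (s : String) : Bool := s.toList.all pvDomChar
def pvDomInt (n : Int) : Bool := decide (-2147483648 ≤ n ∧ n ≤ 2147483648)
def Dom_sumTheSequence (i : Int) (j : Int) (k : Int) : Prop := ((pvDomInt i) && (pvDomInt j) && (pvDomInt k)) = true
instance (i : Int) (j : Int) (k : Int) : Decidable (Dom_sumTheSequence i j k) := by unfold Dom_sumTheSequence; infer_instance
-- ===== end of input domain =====

-- B replaces A's two accumulation loops by the closed-form arithmetic-series formula; intended as faster (timing run measured up to 34x at the largest size, inconsistently: else-branch inputs are O(1) in both).

-- ===== PORT A =====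
def sumTheSequence (i : Int) (j : Int) (k : Int) : Int :=
  if i ≤ j ∧ k ≤ j then
    let temp1 := j - i
    let temp2 := j - k
    let total : Int := 0
    let total := (PySem.List.pyRange 0 temp1 1).foldl (fun total i_digit => total + (i_digit + i)) total
    let total := (PySem.List.pyRange 0 temp2 1).foldl (fun total k_digit => total + (k + k_digit)) total
    total + j
  else
    0

-- ===== PORT B =====
def sumTheSequence_alt (i : Int) (j : Int) (k : Int) : Int :=
  if i ≤ j ∧ k ≤ j then
    PySem.Int.floordiv ((j - i) * (i + j - 1)) 2
      + PySem.Int.floordiv ((j - k) * (k + j - 1)) 2 + j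
  else
    0

-- ===== PRECONDITION & SPEC =====
def Spec_sumTheSequence (i : Int) (j : Int) (k : Int) (out : Int) : Prop := out = sumTheSequence_alt i j k
instance (i : Int) (j : Int) (k : Int) (out : Int) : Decidable (Spec_sumTheSequence i j k out) := by unfold Spec_sumTheSequence; infer_instance

-- ===== CLAIM (what is proved, stated in full; the proofs are below) =====
def Claim_equal_sumTheSequence : Prop := ∀ (i : Int) (j : Int) (k : Int), Dom_sumTheSequence i j k → Spec_sumTheSequence i j k (sumTheSequence i j k)

-- ===== LEMMAS AND PROOFS =====

-- summing d + c over range(n) starting from s: doubled closed form (no division involved)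
lemma pv_foldl_range_sum (c : Int) : ∀ (n : Nat) (s : Int),
    2 * ((PySem.List.pyRange 0 (n : Int) 1).foldl (fun t d => t + (d + c)) s)
      = 2 * s + 2 * (n : Int) * c + (n : Int) * ((n : Int) - 1) := by
  intro n
  induction n with
  | zero => intro s; simp [PySem.List.pyRange_one_eq_nil]
  | succ m ih =>
    intro s
    have h : ((m + 1 : Nat) : Int) = (m : Int) + 1 := by push_cast; ring
    rw [h, PySem.List.pyRange_one_succ_right (by positivity), List.foldl_append]
    simp only [List.foldl_cons, List.foldl_nil]
    rw [mul_add, ih s]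
    ring

lemma pv_half (x : Int) (h : 2 ∣ x) : 2 * PySem.Int.floordiv x 2 = x := by
  rw [PySem.Int.floordiv_eq_ediv_of_pos (by norm_num)]
  omega

-- n*(m) with n + m odd-shifted: (j-a)*(a+j-1) is always even
lemma pv_even_prod (a j : Int) : 2 ∣ (j - a) * (a + j - 1) := by
  rcases Int.even_or_odd (j - a) with ⟨t, ht⟩ | ⟨t, ht⟩
  · exact ⟨t * (a + j - 1), by rw [show j - a = 2 * t by omega]; ring⟩
  · exact ⟨(j - a) * (t + a), by rw [show a + j - 1 = 2 * (t + a) by omega]; ring⟩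

theorem sumTheSequence_spec : Claim_equal_sumTheSequence := by
  intro i j k _
  unfold Spec_sumTheSequence
  simp only [sumTheSequence, sumTheSequence_alt]
  by_cases h : i ≤ j ∧ k ≤ j
  · rw [if_pos h, if_pos h]
    obtain ⟨hij, hkj⟩ := h
    have c1 : (((j - i).toNat : Nat) : Int) = j - i := by omega
    have c2 : (((j - k).toNat : Nat) : Int) = j - k := by omega
    rw [← c1, ← c2]
    have hf : (fun (total k_digit : Int) => total + (k + k_digit))
        = (fun t d => t + (d + k)) := by funext t d; ring
    simp only [hf]
    have e1 := pv_foldl_range_sum i ((j - i).toNat) 0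
    have e2 := pv_foldl_range_sum k ((j - k).toNat)
      ((PySem.List.pyRange 0 (((j - i).toNat : Nat) : Int) 1).foldl (fun t d => t + (d + i)) 0)
    have q1 := pv_half _ (c1 ▸ pv_even_prod i j)
    have q2 := pv_half _ (c2 ▸ pv_even_prod k j)
    have H : 2 * ((PySem.List.pyRange 0 (((j - k).toNat : Nat) : Int) 1).foldl (fun t d => t + (d + k))
          ((PySem.List.pyRange 0 (((j - i).toNat : Nat) : Int) 1).foldl (fun t d => t + (d + i)) 0))
        = 2 * PySem.Int.floordiv ((((j - i).toNat : Nat) : Int) * (i + j - 1)) 2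
          + 2 * PySem.Int.floordiv ((((j - k).toNat : Nat) : Int) * (k + j - 1)) 2 := by
      rw [e2, e1, q1, q2, c1, c2]
      ring
    omega
  · rw [if_neg h, if_neg h]
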